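-- pv_equiv track=rewrite | github.com/ajeetyadab/real_python | clean_code_longest_substring_without_repetetion.py | longest_unique_word
-- ===== SOURCE A (Python) =====
-- import string
--
-- def clean_word(word):
--     return word.translate(str.maketrans("","",string.punctuation))
--
-- def has_unique_charecter(word):
--
--     return len(set(word)) == len(word)
--
-- def longest_unique_word(strings):
--
--     longest_substring_length = 0
--     longest_substring = []
--
--     splitted_string = strings.split()
--
--     for word in splitted_string:
--         clean_worded = clean_word(word)
--         clean_worded = clean_worded.lower()
--
--
--         if not clean_worded:
--             continue
--
--
--         if has_unique_charecter(clean_worded):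
--             if len(clean_worded)>longest_substring_length:
--                 longest_substring = [clean_worded]
--                 longest_substring_length = len(clean_worded)
--
--             elif len(clean_worded) == longest_substring_length:
--                 longest_substring.append(clean_worded)
--
--     return longest_substring,longest_substring_length
-- ===== SOURCE B (Python) =====
-- import string
--
-- def clean_word(word):
--     return word.translate(str.maketrans("", "", string.punctuation))
--
-- def has_unique_charecter(word):
--     return len(set(word)) == len(word)
--
-- def longest_unique_word(strings):
--     valid = [w for w in (clean_word(x).lower() for x in strings.split())
--              if w and has_unique_charecter(w)]
--     m = max((len(w) for w in valid), default=0)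
--     return [w for w in valid if len(w) == m], m
-- ===== Notes on version B (the rewrite author's own statement) =====
-- stated objective: simpler
-- what changed: Replaces the online running-max loop with a running tie-list by three declarative passes: build the list of valid cleaned words, take the max length with default 0, then filter the words of that length.
import Mathlib
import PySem

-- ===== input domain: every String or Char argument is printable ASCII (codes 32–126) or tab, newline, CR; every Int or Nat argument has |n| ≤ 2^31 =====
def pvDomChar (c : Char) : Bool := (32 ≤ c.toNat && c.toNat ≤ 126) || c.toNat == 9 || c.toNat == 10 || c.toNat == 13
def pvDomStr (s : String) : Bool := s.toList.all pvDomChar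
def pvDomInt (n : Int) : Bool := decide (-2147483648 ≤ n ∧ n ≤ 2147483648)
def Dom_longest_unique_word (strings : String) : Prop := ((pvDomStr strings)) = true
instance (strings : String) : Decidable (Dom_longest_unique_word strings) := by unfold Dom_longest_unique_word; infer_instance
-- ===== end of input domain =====

-- B replaces A's single running-max/tie-list loop by three passes (collect valid words, max length, filter); objective: simpler.

-- shared module helpers (both Pythons use the same clean_word / has_unique_charecter)
-- string.punctuation, spelled out; translate-delete is exact as a character filter on ASCII input
def pvPunct : List Char := "!\"#$%&'()*+,-./:;<=>?@[\\]^_`{|}~".toList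

def clean_word (word : String) : String :=
  String.mk (word.toList.filter (fun c => !(pvPunct.contains c)))

def has_unique_charecter (word : String) : Bool :=
  PySem.Set.len (PySem.Set.ofList word.toList) == word.toList.length

def pvStrLen (w : String) : Int := (w.toList.length : Int)

-- ===== PORT A =====
def longest_unique_word (strings : String) : List String × Int :=
  (PySem.Str.split₀ strings).foldl
    (fun acc word =>
      let clean_worded := clean_word word
      let clean_worded := PySem.Str.lower clean_worded
      if clean_worded = "" then acc
      else if has_unique_charecter clean_worded then
        if pvStrLen clean_worded > acc.2 then ([clean_worded], pvStrLen clean_worded)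
        else if pvStrLen clean_worded = acc.2 then (acc.1 ++ [clean_worded], acc.2)
        else acc
      else acc)
    ([], 0)

-- ===== PORT B =====
def longest_unique_word_alt (strings : String) : List String × Int :=
  let valid := ((PySem.Str.split₀ strings).map (fun x => PySem.Str.lower (clean_word x))).filter
      (fun w => !(w == "") && has_unique_charecter w)
  let m := (PySem.List.max? (valid.map pvStrLen) (fun y => y)).getD 0
  (valid.filter (fun w => pvStrLen w == m), m)

-- ===== PRECONDITION & SPEC =====
def Spec_longest_unique_word (strings : String) (out : List String × Int) : Prop := out = longest_unique_word_alt strings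
instance (strings : String) (out : List String × Int) : Decidable (Spec_longest_unique_word strings out) := by unfold Spec_longest_unique_word; infer_instance

-- ===== CLAIM (what is proved, stated in full; the proofs are below) =====
def Claim_equal_longest_unique_word : Prop := ∀ (strings : String), Dom_longest_unique_word strings → Spec_longest_unique_word strings (longest_unique_word strings)

-- ===== LEMMAS AND PROOFS =====

-- the per-valid-word step of A's loop
def pvStep (acc : List String × Int) (w : String) : List String × Int :=
  if pvStrLen w > acc.2 then ([w], pvStrLen w)
  else if pvStrLen w = acc.2 then (acc.1 ++ [w], acc.2)
  else acc

lemma pvFoldSkip (ws : List String) (acc : List String × Int) :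
    ws.foldl
      (fun acc word =>
        let clean_worded := clean_word word
        let clean_worded := PySem.Str.lower clean_worded
        if clean_worded = "" then acc
        else if has_unique_charecter clean_worded then
          if pvStrLen clean_worded > acc.2 then ([clean_worded], pvStrLen clean_worded)
          else if pvStrLen clean_worded = acc.2 then (acc.1 ++ [clean_worded], acc.2)
          else acc
        else acc) acc
    = ((ws.map (fun x => PySem.Str.lower (clean_word x))).filter
        (fun w => !(w == "") && has_unique_charecter w)).foldl pvStep acc := by
  induction ws generalizing acc with
  | nil => rw [List.foldl_nil, List.map_nil, List.filter_nil, List.foldl_nil]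
  | cons w t ih =>
      simp only [List.foldl_cons, List.map_cons, List.filter_cons]
      show t.foldl _
          (if PySem.Str.lower (clean_word w) = "" then acc
           else if has_unique_charecter (PySem.Str.lower (clean_word w)) = true then
             if pvStrLen (PySem.Str.lower (clean_word w)) > acc.2 then
               ([PySem.Str.lower (clean_word w)], pvStrLen (PySem.Str.lower (clean_word w)))
             else if pvStrLen (PySem.Str.lower (clean_word w)) = acc.2 then
               (acc.1 ++ [PySem.Str.lower (clean_word w)], acc.2)
             else acc
           else acc)
        = _
      generalize PySem.Str.lower (clean_word w) = cw
      by_cases h0 : cw = ""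
      · rw [if_pos h0, ih]
        have hp : (!(cw == "") && has_unique_charecter cw) = false := by simp [h0]
        rw [hp]
        simp
      · rw [if_neg h0]
        by_cases hu : has_unique_charecter cw = true
        · rw [if_pos hu, ih]
          have hp : (!(cw == "") && has_unique_charecter cw) = true := by simp [h0, hu]
          rw [hp, if_pos rfl, List.foldl_cons]
          have hs : pvStep acc cw
              = (if pvStrLen cw > acc.2 then ([cw], pvStrLen cw)
                 else if pvStrLen cw = acc.2 then (acc.1 ++ [cw], acc.2) else acc) := rfl
          rw [hs]
        · rw [if_neg hu, ih]
          have hp : (!(cw == "") && has_unique_charecter cw) = false := by simp [hu]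
          rw [hp]
          simp

lemma pv_le_foldl_max (n : Int) (xs : List Int) : n ≤ xs.foldl max n := by
  induction xs generalizing n with
  | nil => exact le_refl n
  | cons x t ih => exact le_trans (le_max_left n x) (ih _)

lemma pvFoldMain (V : List String) (l : List String) (n : Int) :
    V.foldl pvStep (l, n)
      = ((if (V.map pvStrLen).foldl max n = n
            then l ++ V.filter (fun w => pvStrLen w == (V.map pvStrLen).foldl max n)
            else V.filter (fun w => pvStrLen w == (V.map pvStrLen).foldl max n)),
         (V.map pvStrLen).foldl max n) := by
  induction V generalizing l n with
  | nil => simp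
  | cons w t ih =>
      simp only [List.foldl_cons, List.map_cons, List.filter_cons]
      have hstep : pvStep (l, n) w
          = if pvStrLen w > n then ([w], pvStrLen w)
            else if pvStrLen w = n then (l ++ [w], n) else (l, n) := rfl
      rw [hstep]
      by_cases hgt : pvStrLen w > n
      · rw [if_pos hgt, ih]
        have hmax : max n (pvStrLen w) = pvStrLen w := max_eq_right (le_of_lt hgt)
        rw [hmax]
        set M := (t.map pvStrLen).foldl max (pvStrLen w) with hM
        have hle : pvStrLen w ≤ M := pv_le_foldl_max _ _
        have hne : M ≠ n := by omega
        rw [if_neg hne]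
        by_cases he : M = pvStrLen w
        · have hb : (pvStrLen w == M) = true := by simp [he]
          rw [if_pos he, if_pos hb]
          simp
        · have hb : ¬ ((pvStrLen w == M) = true) := by simp; omega
          rw [if_neg he, if_neg hb]
      · rw [if_neg hgt]
        by_cases heq : pvStrLen w = n
        · rw [if_pos heq, ih]
          have hmax : max n (pvStrLen w) = n := by simp [heq]
          rw [hmax]
          set M := (t.map pvStrLen).foldl max n with hM
          by_cases he : M = n
          · have hb : (pvStrLen w == M) = true := by simp [heq, he]
            rw [if_pos he, if_pos he, if_pos hb]
            simp
          · have hb : ¬ ((pvStrLen w == M) = true) := by simp [heq]; omega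
            rw [if_neg he, if_neg he, if_neg hb]
        · rw [if_neg heq, ih]
          have hmax : max n (pvStrLen w) = n := max_eq_left (by omega)
          rw [hmax]
          set M := (t.map pvStrLen).foldl max n with hM
          have hle : n ≤ M := pv_le_foldl_max _ _
          have hb : ¬ ((pvStrLen w == M) = true) := by simp; omega
          rw [if_neg hb]

lemma pvMaxD (xs : List Int) (h : ∀ x ∈ xs, 0 ≤ x) :
    (PySem.List.max? xs (fun y => y)).getD 0 = xs.foldl max 0 := by
  cases xs with
  | nil => rfl
  | cons x t =>
      rw [PySem.List.max?_id_cons]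
      simp only [Option.getD_some, List.foldl_cons]
      have hx : max 0 x = x := max_eq_right (h x (by simp))
      rw [hx]

-- ===== VERDICT (by name: the statement is the Claim_ definition above) =====
theorem longest_unique_word_spec : Claim_equal_longest_unique_word := by
  intro strings _
  show longest_unique_word strings = longest_unique_word_alt strings
  unfold longest_unique_word
  rw [pvFoldSkip, pvFoldMain]
  have hnn : ∀ x ∈ (((PySem.Str.split₀ strings).map (fun x => PySem.Str.lower (clean_word x))).filter
      (fun w => !(w == "") && has_unique_charecter w)).map pvStrLen, (0 : Int) ≤ x := by
    intro x hx
    simp only [List.mem_map] at hx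
    obtain ⟨u, _, rfl⟩ := hx
    simp [pvStrLen]
  unfold longest_unique_word_alt
  show _ = ((((PySem.Str.split₀ strings).map (fun x => PySem.Str.lower (clean_word x))).filter
        (fun w => !(w == "") && has_unique_charecter w)).filter
        (fun w => pvStrLen w ==
          (PySem.List.max? ((((PySem.Str.split₀ strings).map (fun x => PySem.Str.lower (clean_word x))).filter
            (fun w => !(w == "") && has_unique_charecter w)).map pvStrLen) (fun y => y)).getD 0),
      (PySem.List.max? ((((PySem.Str.split₀ strings).map (fun x => PySem.Str.lower (clean_word x))).filter
        (fun w => !(w == "") && has_unique_charecter w)).map pvStrLen) (fun y => y)).getD 0)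
  rw [pvMaxD _ hnn]
  by_cases he : ((((PySem.Str.split₀ strings).map (fun x => PySem.Str.lower (clean_word x))).filter
      (fun w => !(w == "") && has_unique_charecter w)).map pvStrLen).foldl max 0 = 0
  · rw [if_pos he]
    simp
  · rw [if_neg he]
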